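-- pv_equiv track=rewrite | github.com/mkryvets/alg-data-struct | array-matrix-algorithms/array_algorithms.py | sort_min_center
-- ===== SOURCE A (Python) =====
-- def min_element(arr):
--     min_el = arr[0]
--     min_el_index = 0
--     for i in range(len(arr)):
--         if arr[i] < min_el:
--             min_el = arr[i]
--             min_el_index = i
--     return min_el, min_el_index
--
-- def sort_min_center(arr):
--     result_arr = [0] * len(arr)
--     temp_arr = []
--     for el in arr:
--         temp_arr.append(el)
--     if len(arr) % 2 == 1:
--         center_index = int(len(arr) / 2)
--         min_el = min_element(temp_arr)
--         result_arr[center_index] = min_el[0]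
--         del temp_arr[min_el[1]]
--         boundary = center_index + 1
--         for i in range(1, boundary):
--             min_el_left = min_element(temp_arr)
--             result_arr[center_index - i] = min_el_left[0]
--             del temp_arr[min_el_left[1]]
--             min_el_right = min_element(temp_arr)
--             result_arr[center_index + i] = min_el_right[0]
--             del temp_arr[min_el_right[1]]
--     else:
--         left_center_index = int((len(arr) / 2)) - 1
--         right_center_index = int(len(arr) / 2)
--         boundary = int(len(arr) / 2)
--         for i in range(0, boundary):
--             min_el_left = min_element(temp_arr)
--             result_arr[left_center_index - i] = min_el_left[0]
--             del temp_arr[min_el_left[1]]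
--             min_el_right = min_element(temp_arr)
--             result_arr[right_center_index + i] = min_el_right[0]
--             del temp_arr[min_el_right[1]]
--     return result_arr
-- ===== SOURCE B (Python) =====
-- def sort_min_center(arr):
--     s = sorted(arr)
--     if len(arr) % 2 == 1:
--         return s[1::2][::-1] + s[0::2]
--     return s[0::2][::-1] + s[1::2]
-- ===== Notes on version B (the rewrite author's own statement) =====
-- stated objective: faster
-- what changed: Replaces the O(n^2) selection-sort with repeated list deletions and index-by-index center-outward placement by one sorted() call followed by two parity slices (the reversed slice forms the left half, the other the right half).
import Mathlib
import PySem

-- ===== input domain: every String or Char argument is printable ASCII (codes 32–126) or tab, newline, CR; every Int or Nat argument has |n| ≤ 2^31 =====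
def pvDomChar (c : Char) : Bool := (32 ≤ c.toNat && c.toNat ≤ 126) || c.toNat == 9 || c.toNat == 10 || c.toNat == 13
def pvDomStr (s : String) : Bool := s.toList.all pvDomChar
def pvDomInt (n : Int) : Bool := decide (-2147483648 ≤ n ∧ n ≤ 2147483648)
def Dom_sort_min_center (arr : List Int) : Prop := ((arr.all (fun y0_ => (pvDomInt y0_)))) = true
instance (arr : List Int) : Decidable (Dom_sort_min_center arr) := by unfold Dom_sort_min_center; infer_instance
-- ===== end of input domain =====

-- B replaces A's quadratic selection-sort-with-deletion and center-outward index placement by one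
-- sorted() call plus two parity slices (objective: faster, O(n log n) vs O(n^2)).

-- ===== PORT A =====
-- min_element: loop over range(len(arr)) tracking (min value, index of its first occurrence).
-- (The index is kept as a Nat: Python's index is always a nonnegative int here.)
def min_element (arr : List Int) : Int × Nat :=
  (List.range arr.length).foldl
    (fun st i => if arr.getD i 0 < st.1 then (arr.getD i 0, i) else st)
    (arr.headD 0, 0)

-- Literal port of A. 'int(len(arr)/2)' is exact Nat halving here; the index loops
-- range(1, boundary) / range(0, boundary) are List.range' over Nat; 'del temp[i]' is eraseIdx.
def sort_min_center (arr : List Int) : List Int :=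
  let n := arr.length
  let result0 : List Int := List.replicate n 0
  let temp0 := arr.foldl (fun t el => t ++ [el]) ([] : List Int)
  if n % 2 == 1 then
    let c := n / 2
    let m := min_element temp0
    let r1 := result0.set c m.1
    let t1 := temp0.eraseIdx m.2
    let st := (List.range' 1 c).foldl
      (fun (p : List Int × List Int) i =>
        let ml := min_element p.2
        let r := p.1.set (c - i) ml.1
        let t := p.2.eraseIdx ml.2
        let mr := min_element t
        (r.set (c + i) mr.1, t.eraseIdx mr.2)) (r1, t1)
    st.1
  else
    let lc := n / 2 - 1
    let rc := n / 2
    let st := (List.range' 0 (n / 2)).foldl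
      (fun (p : List Int × List Int) i =>
        let ml := min_element p.2
        let r := p.1.set (lc - i) ml.1
        let t := p.2.eraseIdx ml.2
        let mr := min_element t
        (r.set (rc + i) mr.1, t.eraseIdx mr.2)) (result0, temp0)
    st.1

-- ===== PORT B =====
-- s[0::2] (every second element), ported by hand (exact: step-2 slice from the start).
def everyOther : List Int → List Int
  | [] => []
  | [x] => [x]
  | x :: _ :: rest => x :: everyOther rest

-- Literal port of Source B: s = sorted(arr); parity slices, the left one reversed, concatenated.
-- s[1::2] is everyOther (s.drop 1); [::-1] is reverse.
def sort_min_center_alt (arr : List Int) : List Int :=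
  let s := PySem.List.sorted arr (fun x => x) false
  if arr.length % 2 == 1 then
    (everyOther (s.drop 1)).reverse ++ everyOther s
  else
    (everyOther s).reverse ++ everyOther (s.drop 1)

-- ===== PRECONDITION & SPEC =====
def Spec_sort_min_center (arr : List Int) (out : List Int) : Prop := out = sort_min_center_alt arr
instance (arr : List Int) (out : List Int) : Decidable (Spec_sort_min_center arr out) := by unfold Spec_sort_min_center; infer_instance

-- ===== CLAIM (what is proved, stated in full; the proofs are below) =====
def Claim_equal_sort_min_center : Prop := ∀ (arr : List Int), Dom_sort_min_center arr → Spec_sort_min_center arr (sort_min_center arr)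

-- ===== LEMMAS AND PROOFS =====

-- The invariant of min_element's index loop over the first k positions.
theorem min_loop (t : List Int) (ht : t ≠ []) (k : Nat) (hk : k ≤ t.length) :
    ((List.range k).foldl
      (fun st i => if t.getD i 0 < st.1 then (t.getD i 0, i) else st)
      (t.headD 0, 0)).2 < t.length ∧
    t.getD ((List.range k).foldl
      (fun st i => if t.getD i 0 < st.1 then (t.getD i 0, i) else st)
      (t.headD 0, 0)).2 0 = ((List.range k).foldl
      (fun st i => if t.getD i 0 < st.1 then (t.getD i 0, i) else st)
      (t.headD 0, 0)).1 ∧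
    ∀ j < k, ((List.range k).foldl
      (fun st i => if t.getD i 0 < st.1 then (t.getD i 0, i) else st)
      (t.headD 0, 0)).1 ≤ t.getD j 0 := by
  induction k with
  | zero =>
    rcases t with _ | ⟨x, s⟩
    · exact absurd rfl ht
    · simp [List.getD]
  | succ k ih =>
    have ih' := ih (by omega)
    rw [List.range_succ, List.foldl_append]
    set st := (List.range k).foldl
      (fun st i => if t.getD i 0 < st.1 then (t.getD i 0, i) else st)
      (t.headD 0, 0) with hst
    simp only [List.foldl_cons, List.foldl_nil]
    split
    · refine ⟨by omega, rfl, ?_⟩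
      intro j hj
      rcases Nat.lt_succ_iff_lt_or_eq.mp hj with h | h
      · have := ih'.2.2 j h; omega
      · subst h; rfl
    · refine ⟨ih'.1, ih'.2.1, ?_⟩
      intro j hj
      rcases Nat.lt_succ_iff_lt_or_eq.mp hj with h | h
      · exact ih'.2.2 j h
      · subst h; omega

-- min_element of a nonempty list: index in range, pointing at the value, which bounds the list below.
theorem min_element_spec (t : List Int) (ht : t ≠ []) :
    (min_element t).2 < t.length ∧ t.getD (min_element t).2 0 = (min_element t).1 ∧
      ∀ x ∈ t, (min_element t).1 ≤ x := by
  have h := min_loop t ht t.length (le_refl _)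
  refine ⟨h.1, h.2.1, ?_⟩
  intro x hx
  obtain ⟨j, hj, rfl⟩ := List.getElem_of_mem hx
  have := h.2.2 j hj
  rwa [List.getD_eq_getElem _ _ hj] at this

-- The sequence of values A's deletion loop extracts, as a standalone function.
def extract (t : List Int) : List Int :=
  if h : t = [] then [] else
    have hlt : (min_element t).2 < t.length := (min_element_spec t h).1
    (min_element t).1 :: extract (t.eraseIdx (min_element t).2)
termination_by t.length
decreasing_by simp [List.length_eraseIdx, hlt]; omega

theorem extract_cons {t : List Int} {x : Int} {e : List Int} (h : extract t = x :: e) :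
    t ≠ [] ∧ (min_element t).1 = x ∧ extract (t.eraseIdx (min_element t).2) = e := by
  have ht : t ≠ [] := by
    intro hnil; rw [extract, dif_pos hnil] at h; simp at h
  rw [extract, dif_neg ht] at h
  exact ⟨ht, (List.cons.injEq _ _ _ _ ▸ h).1, (List.cons.injEq _ _ _ _ ▸ h).2⟩

theorem extract_length (t : List Int) : (extract t).length = t.length := by
  fun_induction extract with
  | case1 => simp
  | case2 t h hlt ih =>
    simp only [List.length_cons, ih, List.length_eraseIdx, if_pos hlt]
    have : 0 < t.length := List.length_pos_iff.mpr h
    omega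

theorem extract_perm (t : List Int) : List.Perm (extract t) t := by
  fun_induction extract with
  | case1 => simp
  | case2 t h hlt ih =>
    have hget : t[(min_element t).2] = (min_element t).1 := by
      have := (min_element_spec t h).2.1
      rwa [List.getD_eq_getElem _ _ hlt] at this
    exact (List.Perm.cons _ ih).trans
      (by rw [← hget]; exact List.getElem_cons_eraseIdx_perm hlt)

theorem extract_pairwise (t : List Int) : (extract t).Pairwise (· ≤ ·) := by
  fun_induction extract with
  | case1 => simp
  | case2 t h hlt ih =>
    refine List.Pairwise.cons ?_ ih
    intro y hy
    have hy' : y ∈ t.eraseIdx (min_element t).2 :=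
      (extract_perm _).mem_iff.mp hy
    exact (min_element_spec t h).2.2 y (List.mem_of_mem_eraseIdx hy')

-- A's extraction order is exactly sorted(arr).
theorem extract_eq_sorted (t : List Int) :
    extract t = PySem.List.sorted t (fun x => x) false :=
  (PySem.List.sorted_id_eq_of_perm_of_pairwise t (extract t)
    (extract_perm t) (extract_pairwise t)).symm

-- Pure form of A's placement loop: consume the extracted values two at a time,
-- writing them at lc - i and rc + i.
def placePairs (lc rc : Nat) (r : List Int) (i : Nat) : List Int → List Int
  | x :: y :: rest => placePairs lc rc ((r.set (lc - i) x).set (rc + i) y) (i + 1) rest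
  | _ => r

theorem placePairs_nil (lc rc : Nat) (r : List Int) (i : Nat) :
    placePairs lc rc r i [] = r := rfl

theorem placePairs_cons₂ (lc rc : Nat) (r : List Int) (i : Nat) (x y : Int) (rest : List Int) :
    placePairs lc rc r i (x :: y :: rest) =
      placePairs lc rc ((r.set (lc - i) x).set (rc + i) y) (i + 1) rest := rfl



theorem loopA_eq (lc rc : Nat) (k : Nat) :
    ∀ (i : Nat) (r t e : List Int), extract t = e → e.length = 2 * k →
    ((List.range' i k).foldl
      (fun (p : List Int × List Int) i =>
        let ml := min_element p.2
        let r := p.1.set (lc - i) ml.1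
        let t := p.2.eraseIdx ml.2
        let mr := min_element t
        (r.set (rc + i) mr.1, t.eraseIdx mr.2)) (r, t)).1
      = placePairs lc rc r i e := by
  induction k with
  | zero =>
    intro i r t e hext hlen
    rcases e with _ | ⟨x, e⟩
    · rfl
    · simp at hlen
  | succ k ih =>
    intro i r t e hext hlen
    rcases e with _ | ⟨x, e⟩; · simp at hlen
    rcases e with _ | ⟨y, rest⟩; · simp at hlen; omega
    obtain ⟨ht, hx, h1⟩ := extract_cons hext
    obtain ⟨ht1, hy, h2⟩ := extract_cons h1
    rw [List.range'_succ, List.foldl_cons, placePairs_cons₂, ← hx, ← hy]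
    exact ih (i + 1) _ _ rest h2 (by simp at hlen; omega)

theorem getD_set (l : List Int) (a : Nat) (v : Int) (j : Nat) :
    (l.set a v).getD j 0 = if a = j ∧ a < l.length then v else l.getD j 0 := by
  rw [List.getD_eq_getElem?_getD, List.getElem?_set, List.getD_eq_getElem?_getD]
  by_cases h1 : a = j
  · subst h1
    by_cases h2 : a < l.length
    · simp [h2]
    · simp [h2]
  · simp [h1]

theorem getD_cons_two (x y : Int) (rest : List Int) (m : Nat) :
    (x :: y :: rest).getD (m + 2) 0 = rest.getD m 0 := by
  simp [List.getD]

theorem placePairs_getD (lc rc : Nat) (k : Nat) :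
    ∀ (i : Nat) (r e : List Int), e.length = 2 * k → i + k ≤ lc + 1 → lc < rc + i →
      rc + i + k ≤ r.length →
    ∀ j, (placePairs lc rc r i e).getD j 0 =
      if j + i ≤ lc ∧ lc < j + i + k then e.getD (2 * (lc - i - j)) 0
      else if rc + i ≤ j ∧ j < rc + i + k then e.getD (2 * (j - rc - i) + 1) 0
      else r.getD j 0 := by
  induction k with
  | zero =>
    intro i r e hlen _ _ _ j
    rcases e with _ | ⟨x, e⟩
    · rw [placePairs_nil]
      split_ifs with h1 h2
      · omega
      · omega
      · rfl
    · simp at hlen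
  | succ k ih =>
    intro i r e hlen hik hlr hbound j
    rcases e with _ | ⟨x, e⟩; · simp at hlen
    rcases e with _ | ⟨y, rest⟩; · simp at hlen; omega
    have hrest : rest.length = 2 * k := by simp at hlen; omega
    have hrlen : ((r.set (lc - i) x).set (rc + i) y).length = r.length := by simp
    have hls : (r.set (lc - i) x).length = r.length := by simp
    rw [placePairs_cons₂, ih (i + 1) _ rest hrest (by omega) (by omega) (by omega)]
    by_cases hL : j + (i + 1) ≤ lc ∧ lc < j + (i + 1) + k
    · rw [if_pos hL, if_pos (by omega : j + i ≤ lc ∧ lc < j + i + (k + 1))]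
      have h2 : 2 * (lc - i - j) = 2 * (lc - (i + 1) - j) + 2 := by omega
      rw [h2, getD_cons_two]
    · rw [if_neg hL]
      by_cases hR : rc + (i + 1) ≤ j ∧ j < rc + (i + 1) + k
      · rw [if_pos hR,
          if_neg (by omega : ¬(j + i ≤ lc ∧ lc < j + i + (k + 1))),
          if_pos (by omega : rc + i ≤ j ∧ j < rc + i + (k + 1))]
        have h2 : 2 * (j - rc - i) + 1 = 2 * (j - rc - (i + 1)) + 1 + 2 := by omega
        rw [h2, getD_cons_two]
      · rw [if_neg hR, getD_set, getD_set]
        by_cases hc1 : j + i ≤ lc ∧ lc < j + i + (k + 1)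
        · have hji : j + i = lc := by omega
          have h0 : 2 * (lc - i - j) = 0 := by omega
          rw [if_pos hc1, h0, if_neg (by rw [hls]; omega),
            if_pos (by omega : lc - i = j ∧ lc - i < r.length)]
          rfl
        · by_cases hc2 : rc + i ≤ j ∧ j < rc + i + (k + 1)
          · have hji : j = rc + i := by omega
            have h1' : 2 * (j - rc - i) + 1 = 1 := by omega
            rw [if_neg hc1, if_pos hc2, h1',
              if_pos (by rw [hls]; omega : rc + i = j ∧ rc + i < (r.set (lc - i) x).length)]
            rfl
          · rw [if_neg hc1, if_neg hc2,
              if_neg (by rw [hls]; omega : ¬(rc + i = j ∧ rc + i < (r.set (lc - i) x).length)),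
              if_neg (by omega : ¬(lc - i = j ∧ lc - i < r.length))]

theorem everyOther_length (s : List Int) : (everyOther s).length = (s.length + 1) / 2 := by
  fun_induction everyOther with
  | case1 => simp
  | case2 => simp
  | case3 x y rest ih => simp [ih]; omega

theorem everyOther_getD (s : List Int) (j : Nat) :
    (everyOther s).getD j 0 = s.getD (2 * j) 0 := by
  induction s using everyOther.induct generalizing j with
  | case1 => simp [everyOther]
  | case2 x => cases j <;> simp [everyOther, List.getD]
  | case3 x y rest ih =>
    cases j with
    | zero => simp [everyOther, List.getD]
    | succ j =>
      have : 2 * (j + 1) = 2 * j + 1 + 1 := by omega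
      simpa [everyOther, List.getD, this] using ih j

theorem placePairs_length (lc rc : Nat) (r : List Int) (i : Nat) (e : List Int) :
    (placePairs lc rc r i e).length = r.length := by
  fun_induction placePairs with
  | case1 r i x y rest ih => simpa using ih
  | case2 => rfl

theorem getD_drop_one (l : List Int) (j : Nat) : (l.drop 1).getD j 0 = l.getD (j + 1) 0 := by
  rcases l with _ | ⟨x, t⟩ <;> simp [List.getD]

theorem getD_replicate (n j : Nat) : (List.replicate n (0 : Int)).getD j 0 = 0 := by
  by_cases h : j < n
  · rw [List.getD_eq_getElem _ _ (by simpa using h), List.getElem_replicate]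
  · rw [List.getD_eq_default _ _ (by simpa using h)]

theorem getD_append (l1 l2 : List Int) (j : Nat) :
    (l1 ++ l2).getD j 0 =
      if j < l1.length then l1.getD j 0 else l2.getD (j - l1.length) 0 := by
  rw [List.getD_eq_getElem?_getD, List.getElem?_append]
  split_ifs <;> rw [List.getD_eq_getElem?_getD]

theorem getD_reverse (l : List Int) (j : Nat) (h : j < l.length) :
    l.reverse.getD j 0 = l.getD (l.length - 1 - j) 0 := by
  rw [List.getD_eq_getElem _ 0 (by simpa using h), List.getElem_reverse,
    List.getD_eq_getElem _ 0 (by omega)]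

theorem list_eq_of_getD (l1 l2 : List Int) (hlen : l1.length = l2.length)
    (h : ∀ j, l1.getD j 0 = l2.getD j 0) : l1 = l2 := by
  apply List.ext_getElem hlen
  intro j h1 h2
  rw [← List.getD_eq_getElem l1 0 h1, ← List.getD_eq_getElem l2 0 h2, h j]

theorem main_odd (arr : List Int) (c : Nat) (hn : arr.length = 2 * c + 1) :
    sort_min_center arr = sort_min_center_alt arr := by
  have hElen := extract_length arr
  rcases hE : extract arr with _ | ⟨s0, st⟩
  · rw [hE] at hElen; simp at hElen; omega
  obtain ⟨hne, hx0, hrest⟩ := extract_cons hE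
  have hstlen : st.length = 2 * c := by rw [hE] at hElen; simp at hElen; omega
  have hsorted : PySem.List.sorted arr (fun x => x) false = s0 :: st := by
    rw [← extract_eq_sorted, hE]
  have hpar : (arr.length % 2 == 1) = true := by rw [hn]; simp
  have hdiv : arr.length / 2 = c := by omega
  simp only [sort_min_center, sort_min_center_alt, PySem.List.foldl_append_singleton,
    List.nil_append, hpar, if_true, hsorted, hdiv, hx0]
  rw [loopA_eq c c c 1 _ _ st hrest hstlen]
  simp only [List.drop_succ_cons, List.drop_zero]
  have hev : (everyOther st).length = c := by rw [everyOther_length, hstlen]; omega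
  apply list_eq_of_getD
  · rw [placePairs_length]
    simp [everyOther_length, hstlen, hn]
    omega
  · intro j
    rw [placePairs_getD c c c 1 _ st hstlen (by omega) (by omega) (by simp [hn]; omega : c + 1 + c ≤ ((List.replicate arr.length (0:Int)).set c s0).length) j,
      getD_append, List.length_reverse, hev]
    by_cases hj : j < c
    · rw [if_pos (by omega : j + 1 ≤ c ∧ c < j + 1 + c), if_pos hj,
        getD_reverse _ _ (by rw [hev]; omega), hev, everyOther_getD]
    · rw [if_neg hj, everyOther_getD]
      by_cases hjc : j = c
      · have h0 : 2 * (j - c) = 0 := by omega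
        rw [if_neg (by omega), if_neg (by omega), getD_set,
          if_pos (show c = j ∧ c < (List.replicate arr.length (0:Int)).length from
            ⟨hjc.symm, by simp [hn]; omega⟩), h0]
        rfl
      · by_cases hj2 : j < 2 * c + 1
        · rw [if_neg (by omega), if_pos (by omega : c + 1 ≤ j ∧ j < c + 1 + c)]
          have h2 : 2 * (j - c) = 2 * (j - c - 1) + 1 + 1 := by omega
          rw [h2]
          simp [List.getD]
        · rw [if_neg (by omega), if_neg (by omega), getD_set, if_neg (by omega),
            getD_replicate, List.getD_eq_default _ _ (by simp [hstlen]; omega)]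

theorem main_even (arr : List Int) (c : Nat) (hc : 0 < c) (hn : arr.length = 2 * c) :
    sort_min_center arr = sort_min_center_alt arr := by
  have helen : (extract arr).length = 2 * c := by rw [extract_length]; omega
  have hpar : (arr.length % 2 == 1) = false := by rw [hn]; simp [Nat.mul_mod_right]
  have hdiv : arr.length / 2 = c := by omega
  simp only [sort_min_center, sort_min_center_alt, PySem.List.foldl_append_singleton,
    List.nil_append, hpar, Bool.false_eq_true, if_false, hdiv]
  rw [← extract_eq_sorted arr, loopA_eq (c - 1) c c 0 _ _ (extract arr) rfl helen]
  have hev : (everyOther (extract arr)).length = c := by rw [everyOther_length, helen]; omega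
  apply list_eq_of_getD
  · rw [placePairs_length]
    simp [everyOther_length, helen, hn]
    omega
  · intro j
    rw [placePairs_getD (c - 1) c c 0 _ (extract arr) helen (by omega) (by omega)
      (by simp [hn]; omega : c + 0 + c ≤ (List.replicate arr.length (0:Int)).length) j,
      getD_append, List.length_reverse, hev]
    simp only [Nat.sub_zero, Nat.add_zero]
    by_cases hj : j < c
    · rw [if_pos (by omega : j ≤ c - 1 ∧ c - 1 < j + c), if_pos hj,
        getD_reverse _ _ (by rw [hev]; omega), hev, everyOther_getD]
    · rw [if_neg hj, everyOther_getD, getD_drop_one]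
      by_cases hj2 : j < 2 * c
      · rw [if_neg (by omega), if_pos (by omega : c ≤ j ∧ j < c + c)]
      · rw [if_neg (by omega), if_neg (by omega), getD_replicate,
          List.getD_eq_default _ _ (by rw [helen]; omega)]

-- ===== VERDICT (by name: the statement is the Claim_ definition above) =====
theorem sort_min_center_spec : Claim_equal_sort_min_center := by
  intro arr _
  unfold Spec_sort_min_center
  rcases Nat.even_or_odd arr.length with ⟨c, hc⟩ | ⟨c, hc⟩
  · rcases Nat.eq_zero_or_pos c with rfl | hpos
    · have : arr = [] := List.eq_nil_of_length_eq_zero (by omega)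
      subst this; rfl
    · exact main_even arr c hpos (by omega)
  · exact main_odd arr c (by omega)
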